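-- pv_equiv track=rewrite | github.com/YixuanGao98/HW_weight | json_convert.py | get_first_user_and_assistant
-- ===== SOURCE A (Python) =====
-- from typing import List, Dict, Any, Tuple
--
-- def get_first_user_and_assistant(messages: List[Dict[str, Any]]) -> Tuple[str, str]:
--     """
--     返回第一个 user.content 和 第一个 assistant.content。
--     """
--     user_content = None
--     assistant_content = None
--     for m in messages:
--         role = m.get("role", "").strip().lower()
--         content = m.get("content", "")
--         if role == "user" and user_content is None:
--             user_content = content
--         elif role == "assistant" and assistant_content is None:
--             assistant_content = content
--         if user_content is not None and assistant_content is not None: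
--             break
--     if user_content is None or assistant_content is None:
--         raise ValueError("messages 中缺少 user 或 assistant 的 content。")
--     return user_content, assistant_content
-- ===== SOURCE B (Python) =====
-- def get_first_user_and_assistant(messages):
--     def first_content(role):
--         for m in messages:
--             if m.get("role", "").strip().lower() == role:
--                 return m.get("content", "")
--         return None
--
--     user_content = first_content("user")
--     assistant_content = first_content("assistant")
--     if user_content is None or assistant_content is None:
--         raise ValueError("messages 中缺少 user 或 assistant 的 content。")
--     return user_content, assistant_content
-- ===== Notes on version B (the rewrite author's own statement) =====
-- stated objective: simpler
-- what changed: Replaces the single interleaved loop with two-slot state and early break by two independent first-match scans (one for 'user', one for 'assistant').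
import Mathlib
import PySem

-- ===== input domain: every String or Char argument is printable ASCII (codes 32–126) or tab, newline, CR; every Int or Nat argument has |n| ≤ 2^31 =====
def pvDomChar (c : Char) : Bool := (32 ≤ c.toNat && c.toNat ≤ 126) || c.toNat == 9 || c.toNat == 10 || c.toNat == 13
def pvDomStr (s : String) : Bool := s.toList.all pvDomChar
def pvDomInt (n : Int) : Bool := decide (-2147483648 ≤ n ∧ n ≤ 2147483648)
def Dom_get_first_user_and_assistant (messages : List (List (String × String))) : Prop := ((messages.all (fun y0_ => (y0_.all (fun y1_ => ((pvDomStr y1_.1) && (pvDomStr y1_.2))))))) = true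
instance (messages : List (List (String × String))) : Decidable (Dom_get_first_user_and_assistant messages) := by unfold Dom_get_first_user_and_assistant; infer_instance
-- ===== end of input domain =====

-- B replaces A's interleaved two-slot loop (with early break) by two independent first-match scans; objective: simpler.

-- ===== PORT A =====
-- dict m.get(k, dflt) on an association list: first match (exact for Python dicts, which have unique keys)
def pvGetDA (m : List (String × String)) (k dflt : String) : String :=
  ((m.find? (fun p => p.1 == k)).map (fun p => p.2)).getD dflt
-- the loop of A: state = (user_content, assistant_content) as Options, with the early break
def pvGoA : List (List (String × String)) → Option String → Option String → Option String × Option String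
  | [], u, a => (u, a)
  | m :: rest, u, a =>
    let role := PySem.Str.lower (PySem.Str.strip (pvGetDA m "role" ""))
    let content := pvGetDA m "content" ""
    let u' := if role = "user" ∧ u = none then some content else u
    let a' := if ¬ (role = "user" ∧ u = none) ∧ role = "assistant" ∧ a = none then some content else a
    if u' ≠ none ∧ a' ≠ none then (u', a') else pvGoA rest u' a'

def get_first_user_and_assistant (messages : List (List (String × String))) : String × String :=
  match pvGoA messages none none with
  | (some u, some a) => (u, a)
  | _ => ("", "")  -- Python raises ValueError here; excluded by Pre_

-- ===== PORT B =====
-- B's own m.get(k, dflt): first match in the association list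
def pvGetDB (m : List (String × String)) (k dflt : String) : String :=
  ((m.find? (fun p => p.1 == k)).map (fun p => p.2)).getD dflt
-- first_content(role): first message whose normalized role equals `role`, mapped to its content
def pvFirstContent (messages : List (List (String × String))) (role : String) : Option String :=
  (messages.find? (fun m =>
      PySem.Str.lower (PySem.Str.strip (pvGetDB m "role" "")) == role)).map
    (fun m => pvGetDB m "content" "")

def get_first_user_and_assistant_alt (messages : List (List (String × String))) : String × String :=
  -- Source B raises ValueError when either scan returns None; excluded by Pre_, default ("", "")
  (((pvFirstContent messages "user").bind (fun u =>
      (pvFirstContent messages "assistant").map (fun a => (u, a))))).getD ("", "")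

-- ===== PRECONDITION & SPEC =====
-- Pre_'s own reading of m.get("role",""): first match in the association list
def pvGetDP (m : List (String × String)) (k dflt : String) : String :=
  ((m.find? (fun p => p.1 == k)).map (fun p => p.2)).getD dflt

-- Pre_: some message has normalized role "user" and some has "assistant"; otherwise the Python A raises ValueError.
def Pre_get_first_user_and_assistant (messages : List (List (String × String))) : Prop :=
  (messages.any (fun m => PySem.Str.lower (PySem.Str.strip (pvGetDP m "role" "")) == "user")) = true ∧
  (messages.any (fun m => PySem.Str.lower (PySem.Str.strip (pvGetDP m "role" "")) == "assistant")) = true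
instance (messages : List (List (String × String))) : Decidable (Pre_get_first_user_and_assistant messages) := by
  unfold Pre_get_first_user_and_assistant; infer_instance

def pvWitness_get_first_user_and_assistant : (List (List (String × String))) :=
  [[("role", " User "), ("content", "hi")], [("role", "assistant"), ("content", "yo")]]

def Spec_get_first_user_and_assistant (messages : List (List (String × String))) (out : String × String) : Prop := out = get_first_user_and_assistant_alt messages
instance (messages : List (List (String × String))) (out : String × String) : Decidable (Spec_get_first_user_and_assistant messages out) := by unfold Spec_get_first_user_and_assistant; infer_instance

-- ===== CLAIM (what is proved, stated in full; the proofs are below) =====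
def Claim_equal_get_first_user_and_assistant : Prop := ∀ (messages : List (List (String × String))), Dom_get_first_user_and_assistant messages → Pre_get_first_user_and_assistant messages → Spec_get_first_user_and_assistant messages (get_first_user_and_assistant messages)

-- ===== LEMMAS AND PROOFS =====
lemma pvGoA_eq (l : List (List (String × String))) : ∀ (u a : Option String),
    pvGoA l u a = (u.orElse (fun _ => pvFirstContent l "user"),
                   a.orElse (fun _ => pvFirstContent l "assistant")) := by
  have hBA : pvGetDB = pvGetDA := rfl
  induction l with
  | nil => intro u a; cases u <;> cases a <;> simp [pvGoA, pvFirstContent]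
  | cons m rest ih =>
    intro u a
    by_cases hu : PySem.Str.lower (PySem.Str.strip (pvGetDA m "role" "")) = "user" <;>
      by_cases ha : PySem.Str.lower (PySem.Str.strip (pvGetDA m "role" "")) = "assistant"
    · exact absurd (hu ▸ ha) (by decide)
    all_goals
      cases u <;> cases a <;>
        simp [pvGoA, pvFirstContent, hBA, hu, ha, ih, Option.orElse]

theorem pvGoA_main (messages : List (List (String × String))) :
    get_first_user_and_assistant messages = get_first_user_and_assistant_alt messages := by
  unfold get_first_user_and_assistant get_first_user_and_assistant_alt
  rw [pvGoA_eq]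
  cases hU : pvFirstContent messages "user" <;> cases hA : pvFirstContent messages "assistant" <;>
    simp [Option.orElse]

-- ===== VERDICT (by name: the statement is the Claim_ definition above) =====
theorem get_first_user_and_assistant_spec : Claim_equal_get_first_user_and_assistant := by
  intro messages _ _
  unfold Spec_get_first_user_and_assistant
  exact pvGoA_main messages
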